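-- pv_equiv track=rewrite | github.com/siho-song/algorithm | pyboj/2004.py | Counter5
-- ===== SOURCE A (Python) =====
-- def Counter5(num):
--     cnt =0
--     n = 5
--     while True:
--         if num >= n :
--             cnt += num // n
--
--             n = n *5
--         else :
--             break
--     return cnt
-- ===== SOURCE B (Python) =====
-- def Counter5(num):
--     if num < 0:
--         return 0
--     s, m = 0, num
--     while m:
--         s += m % 5
--         m //= 5
--     return (num - s) // 4
-- ===== Notes on version B (the rewrite author's own statement) =====
-- stated objective: alternative
-- what changed: B replaces the Legendre summation loop with the closed form (num - digitsum_base5(num)) // 4: it computes the base-5 digit sum of num and applies Legendre's identity instead of accumulating quotients num//5^k.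
import Mathlib
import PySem

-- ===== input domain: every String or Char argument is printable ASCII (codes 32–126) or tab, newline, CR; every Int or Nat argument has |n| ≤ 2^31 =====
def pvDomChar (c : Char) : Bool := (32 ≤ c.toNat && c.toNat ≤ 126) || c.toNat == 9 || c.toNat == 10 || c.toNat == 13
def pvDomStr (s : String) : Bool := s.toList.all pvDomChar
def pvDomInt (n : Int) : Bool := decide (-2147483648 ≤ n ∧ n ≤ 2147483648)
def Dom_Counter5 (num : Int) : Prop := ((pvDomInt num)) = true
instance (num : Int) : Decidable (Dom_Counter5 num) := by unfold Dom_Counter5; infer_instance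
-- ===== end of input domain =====

-- B replaces A's Legendre summation loop (cnt += num // 5^k) with the closed form
-- (num - digitsum_base5(num)) // 4; objective: alternative algorithm, same cost.

-- ===== PORT A =====
-- A's while loop: state (cnt, n); loops while num ≥ n, adding num // n and setting n := n*5.
-- The invariant 0 < n (A starts at n = 5) is carried as a hypothesis for termination.
def counterA_go (num cnt n : Int) (hn : 0 < n) : Int :=
  if _h : num ≥ n then
    counterA_go num (cnt + PySem.Int.floordiv num n) (n * 5) (by omega)
  else cnt
termination_by (num - n + 1).toNat
decreasing_by omega

def Counter5 (num : Int) : Int := counterA_go num 0 5 (by omega)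

-- ===== PORT B =====
-- B's digit-sum loop: `while m: s += m % 5; m //= 5`. B only reaches it with m = num ≥ 0
-- (the negative case returns 0 first), carried as the hypothesis hm for termination.
def dsum5 (m : Int) (s : Int) (hm : 0 ≤ m) : Int :=
  if h : m ≠ 0 then
    dsum5 (PySem.Int.floordiv m 5) (s + PySem.Int.mod m 5)
      (by rw [PySem.Int.floordiv_eq_ediv_of_pos (by omega)]; omega)
  else s
termination_by m.toNat
decreasing_by
  rw [PySem.Int.floordiv_eq_ediv_of_pos (by omega)]
  omega

def Counter5_alt (num : Int) : Int :=
  if h : num < 0 then 0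
  else PySem.Int.floordiv (num - dsum5 num 0 (by omega)) 4

-- ===== PRECONDITION & SPEC =====
def Spec_Counter5 (num : Int) (out : Int) : Prop := out = Counter5_alt num
instance (num : Int) (out : Int) : Decidable (Spec_Counter5 num out) := by unfold Spec_Counter5; infer_instance

-- ===== CLAIM (what is proved, stated in full; the proofs are below) =====
def Claim_equal_Counter5 : Prop := ∀ (num : Int), Dom_Counter5 num → Spec_Counter5 num (Counter5 num)

-- ===== LEMMAS AND PROOFS =====

-- Tail of the Legendre sum: T m = m + T (m / 5) while m ≥ 1 (proof-only helper).
def pvT (m : Int) : Int :=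
  if h : 1 ≤ m then m + pvT (m / 5) else 0
termination_by m.toNat
decreasing_by omega

theorem pvT_neg (m : Int) (h : ¬ 1 ≤ m) : pvT m = 0 := by
  rw [pvT]; simp [h]

theorem pvT_pos (m : Int) (h : 1 ≤ m) : pvT m = m + pvT (m / 5) := by
  rw [pvT]; simp [h]

theorem geA_iff (num n : Int) (hn : 0 < n) : num ≥ n ↔ 1 ≤ num / n := by
  rw [Int.le_ediv_iff_mul_le hn]; omega

-- A's loop computes cnt + T (num / n).
theorem goA_eq (num cnt n : Int) (hn : 0 < n) :
    counterA_go num cnt n hn = cnt + pvT (num / n) := by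
  rw [counterA_go]
  by_cases h : num ≥ n
  · have hfd : PySem.Int.floordiv num n = num / n := PySem.Int.floordiv_eq_ediv_of_pos hn
    simp only [h, dif_pos, hfd]
    rw [goA_eq num (cnt + num / n) (n * 5) (by omega)]
    have hmul : num / (n * 5) = num / n / 5 := by
      rw [Int.ediv_ediv_of_nonneg (by omega : (0:Int) ≤ n)]
    rw [hmul, pvT_pos (num / n) ((geA_iff num n hn).mp h)]
    ring
  · simp only [h, dif_neg, not_false_iff]
    rw [pvT_neg (num / n) (fun hc => h ((geA_iff num n hn).mpr hc))]
    ring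
termination_by (num - n + 1).toNat
decreasing_by omega

-- Legendre identity: 4 * T (m / 5) + digitsum5 m = m for m ≥ 0 (with the accumulator split out).
theorem dsum5_acc (m s : Int) (hm : 0 ≤ m) : dsum5 m s hm = s + dsum5 m 0 hm := by
  conv_lhs => rw [dsum5]
  conv_rhs => rw [dsum5]
  by_cases h : m = 0
  · subst h; simp
  · rw [dif_pos h, dif_pos h]
    rw [dsum5_acc _ (s + PySem.Int.mod m 5), dsum5_acc _ (0 + PySem.Int.mod m 5)]
    ring
termination_by m.toNat
decreasing_by
  all_goals rw [PySem.Int.floordiv_eq_ediv_of_pos (by omega)]; omega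

theorem legendre (m : Int) (hm : 0 ≤ m) :
    4 * pvT (m / 5) + dsum5 m 0 hm = m := by
  by_cases h : m = 0
  · subst h
    rw [pvT_neg _ (by norm_num), dsum5]
    norm_num
  · rw [dsum5, dif_pos h]
    have hfd : PySem.Int.floordiv m 5 = m / 5 := PySem.Int.floordiv_eq_ediv_of_pos (by omega)
    have hmod : PySem.Int.mod m 5 = m % 5 := PySem.Int.mod_eq_emod_of_pos (by omega)
    have hm5 : 0 ≤ m / 5 := by omega
    rw [dsum5_acc]
    simp only [hfd, hmod]
    have ih := legendre (m / 5) hm5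
    by_cases h5 : 1 ≤ m / 5
    · rw [pvT_pos _ h5]
      have : m / 5 * 5 + m % 5 = m := by omega
      omega
    · rw [pvT_neg _ h5]
      rw [pvT_neg _ (by omega)] at ih
      omega
termination_by m.toNat
decreasing_by omega

-- ===== VERDICT (by name: the statement is the Claim_ definition above) =====
theorem Counter5_spec : Claim_equal_Counter5 := by
  intro num _
  unfold Spec_Counter5 Counter5 Counter5_alt
  rw [goA_eq]
  by_cases hneg : num < 0
  · rw [dif_pos hneg, pvT_neg _ (by omega)]
    ring
  · rw [dif_neg hneg]
    have hnn : (0:Int) ≤ num := by omega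
    have hid := legendre num hnn
    have hfd : PySem.Int.floordiv (num - dsum5 num 0 hnn) 4 = (num - dsum5 num 0 hnn) / 4 :=
      PySem.Int.floordiv_eq_ediv_of_pos (by omega)
    rw [hfd]
    have : num - dsum5 num 0 hnn = 4 * pvT (num / 5) := by omega
    rw [this]
    omega
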